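-- pv_equiv track=rewrite | github.com/robthefrog/dungeon | dungeon_game.py | show_current_grid
-- ===== SOURCE A (Python) =====
-- def show_current_grid(piece_positions, cells):
--     grid_picture = []
--     for idx, cell in enumerate(cells):
--         if piece_positions[0] == cell:
--             grid_picture.append('[P]')
--         elif piece_positions[1] == cell:
--             grid_picture.append('[D]')
--         elif piece_positions[2] == cell:
--             grid_picture.append('[M]')
--         else:
--             grid_picture.append('[ ]')
--
--         if idx > 0 and (idx + 1) % 3 == 0:
--             grid_picture.append('\n')
--
--     return ''.join(grid_picture)
-- ===== SOURCE B (Python) =====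
-- def show_current_grid(piece_positions, cells):
--     def marker(cell):
--         if piece_positions[0] == cell:
--             return '[P]'
--         elif piece_positions[1] == cell:
--             return '[D]'
--         elif piece_positions[2] == cell:
--             return '[M]'
--         else:
--             return '[ ]'
--
--     markers = [marker(cell) for cell in cells]
--     parts = []
--     for i in range(0, len(markers), 3):
--         group = markers[i:i + 3]
--         parts.append(''.join(group))
--         if len(group) == 3:
--             parts.append('\n')
--     return ''.join(parts)
-- ===== Notes on version B (the rewrite author's own statement) =====
-- stated objective: simpler
-- what changed: Replaces the single interleaved loop (marker + conditional newline per index) by two phases: a map pass computing the marker of every cell, then a chunked assembly that joins groups of three markers and appends a newline only after complete groups.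
import Mathlib
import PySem

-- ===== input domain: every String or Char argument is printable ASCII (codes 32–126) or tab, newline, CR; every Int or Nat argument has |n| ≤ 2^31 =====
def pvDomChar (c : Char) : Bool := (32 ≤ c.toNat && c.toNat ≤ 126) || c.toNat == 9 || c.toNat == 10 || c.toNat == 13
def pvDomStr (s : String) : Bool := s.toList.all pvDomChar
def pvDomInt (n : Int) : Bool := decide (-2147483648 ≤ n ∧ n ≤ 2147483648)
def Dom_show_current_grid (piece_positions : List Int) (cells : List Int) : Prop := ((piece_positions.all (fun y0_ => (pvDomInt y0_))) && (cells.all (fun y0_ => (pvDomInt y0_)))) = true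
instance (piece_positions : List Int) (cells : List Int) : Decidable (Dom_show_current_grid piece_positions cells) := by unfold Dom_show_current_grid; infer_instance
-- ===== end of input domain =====

-- B replaces A's single interleaved loop by a marker map pass plus chunked (groups-of-3) assembly; objective: simpler decomposition, same O(n) cost.


-- ===== PORT A =====
-- the if/elif marker chain; none = IndexError from piece_positions[k]
def markerA (pp : List Int) (cell : Int) : Option String :=
  match PySem.List.pyGet? pp 0 with
  | none => none
  | some p0 =>
    if p0 == cell then some "[P]"
    else match PySem.List.pyGet? pp 1 with
      | none => none
      | some p1 =>
        if p1 == cell then some "[D]"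
        else match PySem.List.pyGet? pp 2 with
          | none => none
          | some p2 => if p2 == cell then some "[M]" else some "[ ]"

-- the for-loop over enumerate(cells), carrying grid_picture as accumulator
def gridLoopA (pp : List Int) : List Int → Nat → List String → Option (List String)
  | [], _, acc => some acc
  | cell :: rest, idx, acc =>
    match markerA pp cell with
    | none => none
    | some m =>
      let acc1 := acc ++ [m]
      let acc2 := if 0 < idx ∧ (idx + 1) % 3 = 0 then acc1 ++ ["\n"] else acc1
      gridLoopA pp rest (idx + 1) acc2

def show_current_grid (piece_positions : List Int) (cells : List Int) : String :=
  match gridLoopA piece_positions cells 0 [] with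
  | some grid_picture => PySem.Str.join "" grid_picture
  | none => ""  -- unreachable under Pre_ (Python raises IndexError here)

-- ===== PORT B =====
-- B's marker helper (same chain as its Python helper); none = IndexError
def markerB (pp : List Int) (cell : Int) : Option String :=
  match PySem.List.pyGet? pp 0 with
  | none => none
  | some p0 =>
    if p0 == cell then some "[P]"
    else match PySem.List.pyGet? pp 1 with
      | none => none
      | some p1 =>
        if p1 == cell then some "[D]"
        else match PySem.List.pyGet? pp 2 with
          | none => none
          | some p2 => if p2 == cell then some "[M]" else some "[ ]"

-- markers = [marker(cell) for cell in cells]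
def markersB (pp : List Int) : List Int → Option (List String)
  | [] => some []
  | cell :: rest =>
    match markerB pp cell, markersB pp rest with
    | some m, some ms => some (m :: ms)
    | _, _ => none

-- the chunked assembly: join each group of ≤ 3, '\n' only after full groups
def chunksB : List String → List String
  | [] => []
  | [a] => [PySem.Str.join "" [a]]
  | [a, b] => [PySem.Str.join "" [a, b]]
  | a :: b :: c :: rest => PySem.Str.join "" [a, b, c] :: "\n" :: chunksB rest

def show_current_grid_alt (piece_positions : List Int) (cells : List Int) : String :=
  match markersB piece_positions cells with
  | some markers => PySem.Str.join "" (chunksB markers)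
  | none => ""  -- unreachable under Pre_ (Python raises IndexError here)

-- ===== PRECONDITION & SPEC =====
-- Pre_ excludes exactly the inputs where Python raises IndexError: a cell whose
-- marker lookup reaches a missing piece_positions[0]/[1]/[2].
def Pre_show_current_grid (piece_positions : List Int) (cells : List Int) : Prop :=
  cells.all (fun c => decide (3 ≤ piece_positions.length) || decide (c ∈ piece_positions.take 2)) = true
instance (piece_positions : List Int) (cells : List Int) : Decidable (Pre_show_current_grid piece_positions cells) := by unfold Pre_show_current_grid; infer_instance

def pvWitness_show_current_grid : List Int × List Int := ([1, 2, 3], [1, 2, 3, 4])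

def Spec_show_current_grid (piece_positions : List Int) (cells : List Int) (out : String) : Prop := out = show_current_grid_alt piece_positions cells
instance (piece_positions : List Int) (cells : List Int) (out : String) : Decidable (Spec_show_current_grid piece_positions cells out) := by unfold Spec_show_current_grid; infer_instance

-- ===== CLAIM (what is proved, stated in full; the proofs are below) =====
def Claim_equal_show_current_grid : Prop := ∀ (piece_positions : List Int) (cells : List Int), Dom_show_current_grid piece_positions cells → Pre_show_current_grid piece_positions cells → Spec_show_current_grid piece_positions cells (show_current_grid piece_positions cells)

-- ===== LEMMAS AND PROOFS =====

theorem markerA_eq_markerB (pp : List Int) (c : Int) : markerA pp c = markerB pp c := rfl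

-- under Pre_'s per-cell condition the marker chain never hits a missing index
theorem markerB_isSome (pp : List Int) (c : Int)
    (h : 3 ≤ pp.length ∨ c ∈ pp.take 2) : ∃ m, markerB pp c = some m := by
  match pp, h with
  | [], h => simp at h
  | [a], h =>
    simp at h
    simp [markerB, h]
  | [a, b], h =>
    simp at h
    unfold markerB
    rw [PySem.List.pyGet?_zero_cons]
    by_cases hac : a == c
    · simp [hac]
    · have hbc : b = c := by
        rcases h with h | h
        · exact absurd (by simp [h]) hac
        · exact h.symm
      simp [hac, PySem.List.pyGet?, PySem.List.pyIdx?, hbc]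
  | a :: b :: d :: t, _ =>
    have g0 : PySem.List.pyGet? (a :: b :: d :: t) 0 = some a := by
      rw [show (0 : Int) = ((0 : Nat) : Int) from rfl,
          PySem.List.pyGet?_ofNat (a :: b :: d :: t) 0 (by simp)]
      rfl
    have g1 : PySem.List.pyGet? (a :: b :: d :: t) 1 = some b := by
      rw [show (1 : Int) = ((1 : Nat) : Int) from rfl,
          PySem.List.pyGet?_ofNat (a :: b :: d :: t) 1 (by simp)]
      rfl
    have g2 : PySem.List.pyGet? (a :: b :: d :: t) 2 = some d := by
      rw [show (2 : Int) = ((2 : Nat) : Int) from rfl,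
          PySem.List.pyGet?_ofNat (a :: b :: d :: t) 2 (by simp)]
      rfl
    simp only [markerB, g0, g1, g2]
    split_ifs <;> simp

theorem markersB_isSome (pp : List Int) (cells : List Int)
    (h : ∀ c ∈ cells, 3 ≤ pp.length ∨ c ∈ pp.take 2) : ∃ ms, markersB pp cells = some ms := by
  induction cells with
  | nil => exact ⟨[], rfl⟩
  | cons c rest ih =>
    obtain ⟨m, hm⟩ := markerB_isSome pp c (h c (by simp))
    obtain ⟨ms, hms⟩ := ih (fun x hx => h x (by simp [hx]))
    exact ⟨m :: ms, by simp [markersB, hm, hms]⟩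

-- per-marker newline interleaving (the common shape of both assemblies)
def itl : List String → Nat → List String
  | [], _ => []
  | m :: rest, idx =>
    (if 0 < idx ∧ (idx + 1) % 3 = 0 then [m, "\n"] else [m]) ++ itl rest (idx + 1)

theorem gridLoopA_eq_itl (pp : List Int) (cells : List Int) (ms : List String)
    (h : markersB pp cells = some ms) :
    ∀ idx acc, gridLoopA pp cells idx acc = some (acc ++ itl ms idx) := by
  induction cells generalizing ms with
  | nil =>
    simp only [markersB, Option.some.injEq] at h
    subst h
    intro idx acc
    simp [gridLoopA, itl]
  | cons c rest ih =>
    simp only [markersB] at h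
    cases hm : markerB pp c with
    | none => rw [hm] at h; simp at h
    | some m =>
      rw [hm] at h
      cases hms : markersB pp rest with
      | none => rw [hms] at h; simp at h
      | some tl =>
        rw [hms] at h
        simp only [Option.some.injEq] at h
        subst h
        intro idx acc
        unfold gridLoopA
        rw [markerA_eq_markerB, hm]
        simp only
        rw [ih tl hms]
        have hstep : itl (m :: tl) idx =
            (if 0 < idx ∧ (idx + 1) % 3 = 0 then [m, "\n"] else [m]) ++ itl tl (idx + 1) := rfl
        rw [hstep]
        split_ifs <;> simp

-- shifting the start index by 3 does not change the newline pattern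
theorem itl_shift (ms : List String) : ∀ i, itl ms (i + 3) = itl ms i := by
  induction ms with
  | nil => intro i; rfl
  | cons m rest ih =>
    intro i
    have hc : (0 < i + 3 ∧ (i + 3 + 1) % 3 = 0) ↔ (0 < i ∧ (i + 1) % 3 = 0) := by omega
    unfold itl
    rw [if_congr hc rfl rfl, ← ih (i + 1)]

theorem interc_nil (ll : List (List Char)) : [].intercalate ll = ll.flatten := by
  induction ll with
  | nil => rfl
  | cons a t ih =>
    cases t with
    | nil => simp [List.intercalate]
    | cons b t2 => simp_all [List.intercalate, List.intersperse]

-- characters of ''.join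
theorem join_toList (l : List String) :
    (PySem.Str.join "" l).toList = (l.map String.toList).flatten := by
  simp [PySem.Str.toList_join, PySem.Chars.join, interc_nil]

def J (l : List String) : List Char := (l.map String.toList).flatten

-- the chunked assembly spells out the same characters as the interleaved one
theorem chunks_chars (ms : List String) : J (chunksB ms) = J (itl ms 0) := by
  induction ms using chunksB.induct with
  | case1 => rfl
  | case2 a => simp [chunksB, itl, J, PySem.Chars.join, interc_nil]
  | case3 a b => simp [chunksB, itl, J, PySem.Chars.join, interc_nil]
  | case4 a b c rest ih =>
    have h3 : itl rest 3 = itl rest 0 := itl_shift rest 0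
    simp [chunksB, itl, J, PySem.Chars.join, interc_nil, h3] at ih ⊢
    simp [ih]

-- ===== VERDICT (by name: the statement is the Claim_ definition above) =====
theorem show_current_grid_spec : Claim_equal_show_current_grid := by
  intro pp cells _ hpre
  unfold Spec_show_current_grid
  have hpre' : ∀ c ∈ cells, 3 ≤ pp.length ∨ c ∈ pp.take 2 := by
    simpa [Pre_show_current_grid, List.all_eq_true] using hpre
  obtain ⟨ms, hms⟩ := markersB_isSome pp cells hpre'
  unfold show_current_grid show_current_grid_alt
  rw [hms, gridLoopA_eq_itl pp cells ms hms 0 []]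
  simp only [List.nil_append]
  apply String.toList_inj.mp
  rw [join_toList, join_toList]
  exact (chunks_chars ms).symm
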